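-- pv_equiv track=rewrite | github.com/chambost/competitions | uqcs_codejam/2021/001_anagrams_for_security.py | isItAnAnagram
-- ===== SOURCE A (Python) =====
-- def isItAnAnagram(command, check):
--     from collections import Counter
--     difference = Counter(command)
--     difference.subtract(Counter(check))
--     for elem,count in difference.items() :
--         if count < 0 :
--             return 0
--     return 1
-- ===== SOURCE B (Python) =====
-- def isItAnAnagram(command, check):
--     # Sort both strings and do a greedy ordered match: sorted(check) must be a
--     # subsequence of sorted(command). The single-use iterator consumes matched
--     # characters, so each needed occurrence is used at most once.
--     it = iter(sorted(command))
--     return 1 if all(c in it for c in sorted(check)) else 0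
-- ===== Notes on version B (the rewrite author's own statement) =====
-- stated objective: alternative
-- what changed: Replaces the count-table approach (build Counter(command), subtract Counter(check), scan for negatives) with a sort-and-greedy-match algorithm: sort both strings and check that sorted(check) is a subsequence of sorted(command) by consuming a single-use iterator; no count table exists at any point.
import Mathlib
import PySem

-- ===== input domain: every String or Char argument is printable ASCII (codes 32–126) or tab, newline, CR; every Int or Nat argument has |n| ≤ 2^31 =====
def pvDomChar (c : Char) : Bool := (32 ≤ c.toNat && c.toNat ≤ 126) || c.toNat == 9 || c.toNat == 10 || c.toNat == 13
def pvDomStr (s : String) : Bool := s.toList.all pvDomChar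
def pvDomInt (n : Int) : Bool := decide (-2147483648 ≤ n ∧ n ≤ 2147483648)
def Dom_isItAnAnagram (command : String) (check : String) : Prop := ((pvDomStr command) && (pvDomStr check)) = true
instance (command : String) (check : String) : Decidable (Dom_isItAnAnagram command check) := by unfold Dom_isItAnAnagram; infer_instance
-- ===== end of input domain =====

-- B replaces A's Counter-build/subtract/scan with sort-both-and-greedy-match: sorted(check) must be a subsequence of sorted(command); objective: alternative.


-- ===== PORT A =====
-- the 'for elem,count in difference.items(): if count < 0: return 0 / return 1' loop
def pvLoopA : List (Char × Int) → Int
  | [] => 1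
  | (_, cnt) :: rest => if cnt < 0 then 0 else pvLoopA rest

def isItAnAnagram (command : String) (check : String) : Int :=
  -- difference = Counter(command); difference.subtract(Counter(check))
  let difference :=
    (PySem.Dict.counter check.toList).items.foldl
      (fun d p => d.modify p.1 0 (fun x => x - p.2))
      (PySem.Dict.counter command.toList)
  pvLoopA difference.items

-- ===== PORT B =====
-- 'c in it' on the single-use iterator: scan forward for c, keep the rest of the iterator
def pvConsume (c : Char) : List Char → Option (List Char)
  | [] => none
  | x :: xs => if x = c then some xs else pvConsume c xs

-- 'all(c in it for c in sorted(check))'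
def pvAllIn : List Char → List Char → Bool
  | [], _ => true
  | c :: cs, it =>
    match pvConsume c it with
    | none => false
    | some it' => pvAllIn cs it'

def isItAnAnagram_alt (command : String) (check : String) : Int :=
  let it := PySem.List.sorted command.toList (fun x => x) false
  if pvAllIn (PySem.List.sorted check.toList (fun x => x) false) it then 1 else 0

-- ===== PRECONDITION & SPEC =====
def Spec_isItAnAnagram (command : String) (check : String) (out : Int) : Prop := out = isItAnAnagram_alt command check
instance (command : String) (check : String) (out : Int) : Decidable (Spec_isItAnAnagram command check out) := by unfold Spec_isItAnAnagram; infer_instance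

-- ===== CLAIM (what is proved, stated in full; the proofs are below) =====
def Claim_equal_isItAnAnagram : Prop := ∀ (command : String) (check : String), Dom_isItAnAnagram command check → Spec_isItAnAnagram command check (isItAnAnagram command check)

-- ===== LEMMAS AND PROOFS =====

-- the early-return loop returns 0 iff some count is negative
theorem pvLoopA_eq_any (l : List (Char × Int)) :
    pvLoopA l = if l.any (fun p => p.2 < 0) then 0 else 1 := by
  induction l with
  | nil => simp [pvLoopA]
  | cons p rest ih =>
      obtain ⟨k, v⟩ := p
      simp only [pvLoopA, List.any_cons, ih]
      by_cases h : v < 0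
      · simp [h]
      · simp only [decide_eq_false h, Bool.false_or, if_neg h]

-- getD after the subtraction fold
theorem getD_foldl_modify_sub (l : List (Char × Int)) (d : PySem.Dict Char Int) (c : Char) :
    (l.foldl (fun d p => d.modify p.1 0 (fun x => x - p.2)) d).getD c 0
      = d.getD c 0 - ((l.filter (fun p => p.1 == c)).map Prod.snd).sum := by
  induction l generalizing d with
  | nil => simp
  | cons p rest ih =>
      obtain ⟨k, v⟩ := p
      simp only [List.foldl_cons, ih, List.filter_cons]
      by_cases h : k = c
      · subst h
        rw [PySem.Dict.getD_modify]
        simp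
        ring
      · rw [PySem.Dict.getD_modify]
        simp [h, Ne.symm h]

theorem filter_beq_of_nodup (c : Char) (s : List Char) (h : s.Nodup) :
    s.filter (fun k => k == c) = if c ∈ s then [c] else [] := by
  induction s with
  | nil => simp
  | cons a t ih =>
      simp only [List.nodup_cons] at h
      by_cases hac : a = c
      · subst hac
        simp [ih h.2, h.1]
      · simp [hac, ih h.2, Ne.symm hac]

-- the filtered check-counter items
theorem filter_counter_items (check : List Char) (c : Char) :
    (((PySem.Dict.counter check).items.filter (fun p => p.1 == c)).map Prod.snd).sum
      = if c ∈ check then (check.count c : Int) else 0 := by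
  rw [PySem.Dict.items_counter, List.filter_map]
  have : (fun p : Char × Int => p.1 == c) ∘ (fun k => (k, (check.count k : Int))) = fun k => k == c := rfl
  rw [this, filter_beq_of_nodup c _ (PySem.Set.nodup_ofList check)]
  by_cases h : c ∈ check <;> simp [h, PySem.Set.mem_ofList]

-- value of the difference dict at any character
theorem getD_difference (command check : List Char) (c : Char) :
    ((PySem.Dict.counter check).items.foldl
        (fun d p => d.modify p.1 0 (fun x => x - p.2))
        (PySem.Dict.counter command)).getD c 0
      = (command.count c : Int) - (if c ∈ check then (check.count c : Int) else 0) := by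
  rw [getD_foldl_modify_sub, PySem.Dict.getD_counter, filter_counter_items]

theorem keys_difference (command check : List Char) (c : Char) :
    c ∈ ((PySem.Dict.counter check).items.foldl
        (fun d p => d.modify p.1 0 (fun x => x - p.2))
        (PySem.Dict.counter command)).keys
      ↔ c ∈ command ∨ c ∈ check := by
  rw [PySem.Dict.keys_foldl_modify_key]
  rw [PySem.Set.mem_update, PySem.Dict.keys_counter, PySem.Set.mem_ofList]
  constructor
  · rintro (h | h)
    · exact Or.inl h
    · simp only [PySem.Dict.items_counter, List.map_map, List.mem_map] at h
      obtain ⟨k, hk, rfl⟩ := h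
      exact Or.inr ((PySem.Set.mem_ofList _ _).mp hk)
  · rintro (h | h)
    · exact Or.inl h
    · refine Or.inr ?_
      simp only [PySem.Dict.items_counter, List.map_map, List.mem_map]
      exact ⟨c, (PySem.Set.mem_ofList _ _).mpr h, rfl⟩

theorem nodup_keys_difference (command check : List Char) :
    ((PySem.Dict.counter check).items.foldl
        (fun d p => d.modify p.1 0 (fun x => x - p.2))
        (PySem.Dict.counter command)).keys.Nodup :=
  PySem.Dict.nodup_keys_foldl_modify_key _ _ _ _ _ (PySem.Dict.nodup_keys_counter _)

-- A returns 1 exactly when check's counts are all covered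
theorem portA_eq_cond (command check : String) :
    isItAnAnagram command check
      = if ∀ c ∈ check.toList, check.toList.count c ≤ command.toList.count c then 1 else 0 := by
  unfold isItAnAnagram
  simp only []
  set d := (PySem.Dict.counter check.toList).items.foldl
      (fun d p => d.modify p.1 0 (fun x => x - p.2))
      (PySem.Dict.counter command.toList) with hd
  rw [pvLoopA_eq_any]
  rw [PySem.Dict.items_eq_map_keys d (nodup_keys_difference _ _) 0]
  have hany : (d.keys.map (fun k => (k, d.getD k 0))).any (fun p => p.2 < 0)
      = d.keys.any (fun k => d.getD k 0 < 0) := by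
    rw [List.any_map]; rfl
  rw [hany]
  by_cases hcov : ∀ c ∈ check.toList, check.toList.count c ≤ command.toList.count c
  · have h1 : d.keys.any (fun k => d.getD k 0 < 0) = false := by
      rw [Bool.eq_false_iff]
      intro hany'
      rw [List.any_eq_true] at hany'
      obtain ⟨c, hcmem, hclt⟩ := hany'
      rw [hd, getD_difference] at hclt
      simp only [decide_eq_true_eq] at hclt
      by_cases hc : c ∈ check.toList
      · simp only [hc, if_true] at hclt
        have := hcov c hc
        omega
      · simp only [hc, if_false, sub_zero] at hclt
        have : (0 : Int) ≤ (command.toList.count c : Int) := by positivity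
        omega
    rw [h1, if_pos hcov]; simp
  · push Not at hcov
    obtain ⟨c, hc, hlt⟩ := hcov
    have h1 : d.keys.any (fun k => d.getD k 0 < 0) = true := by
      rw [List.any_eq_true]
      refine ⟨c, (keys_difference _ _ c).mpr (Or.inr hc), ?_⟩
      rw [hd, getD_difference]
      simp only [hc, if_true, decide_eq_true_eq]
      omega
    rw [h1]
    have : ¬ ∀ c ∈ check.toList, check.toList.count c ≤ command.toList.count c := by
      intro h; exact absurd (h c hc) (by omega)
    simp [this]

-- 'c in it': success leaves a suffix into which any further sublist extends back
theorem pvConsume_sound (c : Char) (a a' : List Char) (h : pvConsume c a = some a')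
    (cs : List Char) (hcs : List.Sublist cs a') : List.Sublist (c :: cs) a := by
  induction a generalizing a' with
  | nil => simp [pvConsume] at h
  | cons x xs ih =>
      by_cases hx : x = c
      · subst hx
        simp [pvConsume] at h
        subst h
        exact List.Sublist.cons₂ x hcs
      · simp [pvConsume, hx] at h
        exact List.Sublist.cons x (ih a' h hcs)

theorem pvConsume_complete (c : Char) (cs a : List Char) (h : List.Sublist (c :: cs) a) :
    ∃ a', pvConsume c a = some a' ∧ List.Sublist cs a' := by
  induction a with
  | nil => cases h
  | cons x xs ih =>
      by_cases hx : x = c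
      · subst hx
        refine ⟨xs, by simp [pvConsume], ?_⟩
        cases h with
        | cons _ h' => exact (List.sublist_cons_self x cs).trans h'
        | cons₂ => assumption
      · cases h with
        | cons _ h' =>
            obtain ⟨a', ha', hcs⟩ := ih h'
            exact ⟨a', by simp [pvConsume, hx, ha'], hcs⟩
        | cons₂ => exact absurd rfl hx

-- greedy single-use-iterator matching decides the subsequence relation
theorem pvAllIn_iff_sublist (b a : List Char) : pvAllIn b a = true ↔ List.Sublist b a := by
  induction b generalizing a with
  | nil => simp [pvAllIn]
  | cons c cs ih =>
      constructor
      · intro h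
        unfold pvAllIn at h
        cases hcons : pvConsume c a with
        | none => rw [hcons] at h; simp at h
        | some a' =>
            rw [hcons] at h
            exact pvConsume_sound c a a' hcons cs ((ih a').mp h)
      · intro h
        obtain ⟨a', ha', hcs⟩ := pvConsume_complete c cs a h
        unfold pvAllIn
        rw [ha']
        exact (ih a').mpr hcs

-- sorted(check) is a subsequence of sorted(command) iff command covers check's counts
theorem sorted_sublist_iff_counts (command check : List Char) :
    List.Sublist (PySem.List.sorted check (fun x => x) false) (PySem.List.sorted command (fun x => x) false)
      ↔ ∀ c ∈ check, check.count c ≤ command.count c := by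
  have pc : (PySem.List.sorted check (fun x => x) false).Perm check := PySem.List.sorted_perm _ _ _
  have pa : (PySem.List.sorted command (fun x => x) false).Perm command := PySem.List.sorted_perm _ _ _
  constructor
  · intro h c _
    have := h.count_le c
    rwa [pc.count_eq, pa.count_eq] at this
  · intro h
    have hsub : List.Subperm (PySem.List.sorted check (fun x => x) false) (PySem.List.sorted command (fun x => x) false) := by
      rw [List.subperm_iff_count]
      intro c
      rw [pc.count_eq, pa.count_eq]
      by_cases hc : c ∈ check
      · exact h c hc
      · simp [List.count_eq_zero_of_not_mem hc]
    exact List.sublist_of_subperm_of_pairwise hsub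
      (PySem.List.sorted_pairwise check (fun x => x))
      (PySem.List.sorted_pairwise command (fun x => x))

-- ===== VERDICT (by name: the statement is the Claim_ definition above) =====
theorem isItAnAnagram_spec : Claim_equal_isItAnAnagram := by
  intro command check _
  unfold Spec_isItAnAnagram isItAnAnagram_alt
  rw [portA_eq_cond]
  simp only []
  by_cases h : ∀ c ∈ check.toList, check.toList.count c ≤ command.toList.count c
  · rw [if_pos h, if_pos ((pvAllIn_iff_sublist _ _).mpr ((sorted_sublist_iff_counts _ _).mpr h))]
  · rw [if_neg h, if_neg ?_]
    intro hb
    exact h ((sorted_sublist_iff_counts _ _).mp ((pvAllIn_iff_sublist _ _).mp hb))
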